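-- pv_equiv track=rewrite | github.com/SSAFY-6-1-3/Algorithm | 220823/p_68646_junh.py | solution
-- ===== SOURCE A (Python) =====
-- def solution(a):
--     n = len(a)
--     answer = n
--
--     dp_l = [i for i in range(n)]
--     dp_r = [i for i in range(n)]
--
--     for i in range(1, n):
--         if a[dp_l[i-1]] < a[dp_l[i]]:
--             dp_l[i] = dp_l[i-1]
--
--         if a[dp_r[n-i]] < a[dp_r[n-1-i]]:
--             dp_r[n-i-1] = dp_r[n-i]
--
--
--     for i in range(n):
--         if a[i] > a[dp_l[i]] and a[i] > a[dp_r[i]]: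
--             answer -= 1
--
--
--     return answer
-- ===== SOURCE B (Python) =====
-- def solution(a):
--     n = len(a)
--     count = 0
--     for i in range(n):
--         if all(a[j] >= a[i] for j in range(i)) or all(a[j] >= a[i] for j in range(i + 1, n)):
--             count += 1
--     return count
-- ===== Notes on version B (the rewrite author's own statement) =====
-- stated objective: simpler
-- what changed: Replaces A's prefix/suffix argmin-index DP arrays and the final subtraction pass with a direct definition check: for each position, test with a quantifier (all) whether every earlier element or every later element is >= it, and count the positions that pass.
import Mathlib
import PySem

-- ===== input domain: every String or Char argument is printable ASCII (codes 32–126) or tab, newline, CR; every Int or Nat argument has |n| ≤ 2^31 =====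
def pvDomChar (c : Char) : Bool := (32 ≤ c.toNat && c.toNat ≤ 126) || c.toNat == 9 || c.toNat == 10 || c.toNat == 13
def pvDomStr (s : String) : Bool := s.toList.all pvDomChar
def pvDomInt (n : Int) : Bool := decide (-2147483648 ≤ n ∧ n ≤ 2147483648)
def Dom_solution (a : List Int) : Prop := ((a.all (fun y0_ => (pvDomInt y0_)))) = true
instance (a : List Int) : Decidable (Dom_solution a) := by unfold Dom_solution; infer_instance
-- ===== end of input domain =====

-- B replaces A's prefix/suffix argmin-index DP arrays and counting pass by a direct
-- definition check per position (all earlier or all later elements ≥ it); objective: simpler.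

-- ===== PORT A =====
-- all list indices A uses are provably in range, so a[...] is ported with the total pyGetD
def pvGetA (a : List Int) (i : Int) : Int := PySem.List.pyGetD a i 0

-- body of A's first loop acting on dp_l
def stepL (a : List Int) (dl : List Int) (i : Int) : List Int :=
  if pvGetA a (pvGetA dl (i-1)) < pvGetA a (pvGetA dl i) then
    PySem.List.pySetD dl i (pvGetA dl (i-1))
  else dl

-- body of A's first loop acting on dp_r
def stepR (a : List Int) (n : Int) (dr : List Int) (i : Int) : List Int :=
  if pvGetA a (pvGetA dr (n-i)) < pvGetA a (pvGetA dr (n-1-i)) then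
    PySem.List.pySetD dr (n-i-1) (pvGetA dr (n-i))
  else dr

def solution (a : List Int) : Int :=
  let n : Int := a.length
  let dp := (PySem.List.pyRange 1 n 1).foldl (fun st i => (stepL a st.1 i, stepR a n st.2 i))
              ((PySem.List.pyRange 0 n 1), (PySem.List.pyRange 0 n 1))
  (PySem.List.pyRange 0 n 1).foldl (fun answer i =>
    if pvGetA a i > pvGetA a (pvGetA dp.1 i) ∧ pvGetA a i > pvGetA a (pvGetA dp.2 i)
    then answer - 1 else answer) n

-- ===== PORT B =====
-- Source B indexes a[...] only in range, so indexing is ported with the total pyGetD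
def pvGetB (a : List Int) (i : Int) : Int := PySem.List.pyGetD a i 0

def solution_alt (a : List Int) : Int :=
  let n : Int := a.length
  (PySem.List.pyRange 0 n 1).foldl (fun count i =>
    if ((PySem.List.pyRange 0 i 1).all (fun j => decide (pvGetB a j ≥ pvGetB a i)))
       || ((PySem.List.pyRange (i+1) n 1).all (fun j => decide (pvGetB a j ≥ pvGetB a i)))
    then count + 1 else count) 0

-- ===== PRECONDITION & SPEC =====
def Spec_solution (a : List Int) (out : Int) : Prop := out = solution_alt a
instance (a : List Int) (out : Int) : Decidable (Spec_solution a out) := by unfold Spec_solution; infer_instance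

-- ===== CLAIM (what is proved, stated in full; the proofs are below) =====
def Claim_equal_solution : Prop := ∀ (a : List Int), Dom_solution a → Spec_solution a (solution a)

-- ===== LEMMAS AND PROOFS =====

-- min of a[0..i] (indices clamped by getD; only used for i < a.length)
def pmin (a : List Int) : Nat → Int
  | 0 => a.getD 0 0
  | i+1 => min (pmin a i) (a.getD (i+1) 0)

-- min of a[i..n-1], expressed through the reversed list
def smin (a : List Int) (i : Nat) : Int := pmin a.reverse (a.length - 1 - i)

def dlFold (a : List Int) (k : Int) : List Int :=
  (PySem.List.pyRange 1 k 1).foldl (stepL a) (PySem.List.pyRange 0 (a.length : Int) 1)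

def drFold (a : List Int) (k : Int) : List Int :=
  (PySem.List.pyRange 1 k 1).foldl (stepR a (a.length : Int)) (PySem.List.pyRange 0 (a.length : Int) 1)

-- position j is "not visible from either side": subtracted by A, not counted by B
def badAt (a : List Int) (j : Nat) : Bool :=
  decide (pmin a j < a.getD j 0) && decide (smin a j < a.getD j 0)

theorem foldl_pair {α β γ : Type} (l : List γ) (f : α → γ → α) (g : β → γ → β) (x : α) (y : β) :
    l.foldl (fun st c => (f st.1 c, g st.2 c)) (x, y) = (l.foldl f x, l.foldl g y) := by
  induction l generalizing x y with
  | nil => rfl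
  | cons c t ih => simpa using ih (f x c) (g y c)

theorem smin_last (a : List Int) (h : a ≠ []) :
    smin a (a.length - 1) = a.getD (a.length - 1) 0 := by
  have hn : 0 < a.length := by cases a with | nil => simp at h | cons x t => simp
  unfold smin
  rw [Nat.sub_self]
  show a.reverse.getD 0 0 = _
  rw [PySem.List.getD_eq_getElem_of_lt a.reverse 0 0 (by simpa using hn),
      PySem.List.getD_eq_getElem_of_lt a (a.length - 1) 0 (by omega),
      List.getElem_reverse]
  congr 1

theorem smin_step (a : List Int) (i : Nat) (h : i + 1 < a.length) :
    smin a i = min (smin a (i+1)) (a.getD i 0) := by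
  unfold smin
  rw [show a.length - 1 - i = (a.length - 1 - (i+1)) + 1 by omega]
  show min (pmin a.reverse (a.length - 1 - (i+1))) (a.reverse.getD (a.length - 1 - (i+1) + 1) 0) = _
  have hg : a.reverse.getD (a.length - 1 - (i+1) + 1) 0 = a.getD i 0 := by
    rw [PySem.List.getD_eq_getElem_of_lt a.reverse _ 0 (by simp; omega),
        PySem.List.getD_eq_getElem_of_lt a i 0 (by omega),
        List.getElem_reverse]
    congr 1
    omega
  rw [hg]

theorem init_entry (a : List Int) (j : Nat) (h : j < a.length) :
    pvGetA (PySem.List.pyRange 0 (a.length : Int) 1) (j : Int) = (j : Int) := by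
  unfold pvGetA
  rw [PySem.List.pyGetD_natCast,
      PySem.List.getD_eq_getElem_of_lt _ j (0:Int)
        (by rw [PySem.List.length_pyRange_one]; omega),
      PySem.List.getElem_pyRange_one]
  simp

theorem dl_inv (a : List Int) : ∀ k : Nat, k < a.length →
    (dlFold a ((k : Int)+1)).length = a.length ∧
    ∀ j : Nat, j < a.length →
      (j ≤ k → pvGetA a (pvGetA (dlFold a ((k : Int)+1)) (j : Int)) = pmin a j) ∧
      (k < j → pvGetA (dlFold a ((k : Int)+1)) (j : Int) = (j : Int)) := by
  intro k
  induction k with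
  | zero =>
    intro hk
    rw [show (((0:Nat):Int)) = (0:Int) from rfl]
    have hnil : PySem.List.pyRange 1 ((0:Int)+1) 1 = [] := PySem.List.pyRange_one_eq_nil (by omega)
    have hfold : dlFold a ((0:Int)+1) = PySem.List.pyRange 0 (a.length:Int) 1 := by
      unfold dlFold; rw [hnil]; rfl
    rw [hfold]
    refine ⟨by rw [PySem.List.length_pyRange_one]; omega, fun j hj => ⟨fun hj0 => ?_, fun _ => init_entry a j hj⟩⟩
    have hj0' : j = 0 := Nat.le_zero.mp hj0
    subst hj0'
    rw [init_entry a 0 hj]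
    unfold pvGetA
    rw [show ((0:Nat):Int) = ((0:Nat):Int) from rfl, PySem.List.pyGetD_natCast]
    rfl
  | succ k ih =>
    intro hk
    obtain ⟨ihlen, ihent⟩ := ih (by omega)
    have hcast : ((k+1:Nat) : Int) = (k:Int)+1 := by omega
    have hfold : dlFold a (((k+1:Nat):Int)+1) = stepL a (dlFold a ((k:Int)+1)) ((k:Int)+1) := by
      unfold dlFold
      rw [hcast, PySem.List.pyRange_one_succ_right (by omega : (1:Int) ≤ (k:Int)+1), List.foldl_append]
      rfl
    set dl := dlFold a ((k:Int)+1) with hdl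
    have hidx : pvGetA dl ((k:Int)+1) = (k:Int)+1 := by
      have h2 := (ihent (k+1) (by omega)).2 (by omega)
      rwa [hcast] at h2
    have hval : pvGetA a (pvGetA dl (k:Int)) = pmin a k := (ihent k (by omega)).1 (Nat.le_refl k)
    have haidx : pvGetA a ((k:Int)+1) = a.getD (k+1) 0 := by
      rw [← hcast]; unfold pvGetA; rw [PySem.List.pyGetD_natCast]
    have hstep : stepL a dl ((k:Int)+1)
        = if pmin a k < a.getD (k+1) 0 then PySem.List.pySetD dl ((k:Int)+1) (pvGetA dl (k:Int)) else dl := by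
      unfold stepL
      rw [show (k:Int)+1-1 = (k:Int) from by omega, hval, hidx, haidx]
    have hpm : pmin a (k+1) = min (pmin a k) (a.getD (k+1) 0) := rfl
    rw [hfold, hstep]
    by_cases hc : pmin a k < a.getD (k+1) 0
    · rw [if_pos hc]
      have hread : ∀ (j : Nat), pvGetA (PySem.List.pySetD dl ((k:Int)+1) (pvGetA dl (k:Int))) (j:Int)
          = if j = k+1 then pvGetA dl (k:Int) else pvGetA dl (j:Int) := by
        intro j
        unfold pvGetA
        rw [← hcast]
        exact PySem.List.pyGetD_pySetD_natCast dl (k+1) j _ 0 (by rw [ihlen]; omega)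
      refine ⟨by rw [PySem.List.length_pySetD]; exact ihlen, fun j hj => ⟨fun hjk => ?_, fun hjk => ?_⟩⟩
      · by_cases hje : j = k+1
        · subst hje
          rw [hread (k+1), if_pos rfl, hval, hpm]
          omega
        · rw [hread j, if_neg hje]
          exact (ihent j hj).1 (by omega)
      · rw [hread j, if_neg (by omega)]
        exact (ihent j hj).2 (by omega)
    · rw [if_neg hc]
      refine ⟨ihlen, fun j hj => ⟨fun hjk => ?_, fun hjk => (ihent j hj).2 (by omega)⟩⟩
      by_cases hje : j = k+1
      · subst hje
        rw [show ((k+1:Nat):Int) = (k:Int)+1 from hcast, hidx, haidx, hpm]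
        omega
      · exact (ihent j hj).1 (by omega)

theorem dr_inv (a : List Int) : ∀ k : Nat, k < a.length →
    (drFold a ((k : Int)+1)).length = a.length ∧
    ∀ j : Nat, j < a.length →
      (a.length - 1 - k ≤ j → pvGetA a (pvGetA (drFold a ((k : Int)+1)) (j : Int)) = smin a j) ∧
      (j < a.length - 1 - k → pvGetA (drFold a ((k : Int)+1)) (j : Int) = (j : Int)) := by
  intro k
  induction k with
  | zero =>
    intro hk
    rw [show (((0:Nat):Int)) = (0:Int) from rfl]
    have hnil : PySem.List.pyRange 1 ((0:Int)+1) 1 = [] := PySem.List.pyRange_one_eq_nil (by omega)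
    have hfold : drFold a ((0:Int)+1) = PySem.List.pyRange 0 (a.length:Int) 1 := by
      unfold drFold; rw [hnil]; rfl
    rw [hfold]
    refine ⟨by rw [PySem.List.length_pyRange_one]; omega, fun j hj => ⟨fun hj0 => ?_, fun _ => init_entry a j hj⟩⟩
    have hj0' : j = a.length - 1 := by omega
    subst hj0'
    rw [init_entry a (a.length - 1) hj]
    have hne : a ≠ [] := by intro he; rw [he] at hk; simp at hk
    rw [smin_last a hne]
    unfold pvGetA
    rw [PySem.List.pyGetD_natCast]
  | succ k ih =>
    intro hk
    obtain ⟨ihlen, ihent⟩ := ih (by omega)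
    set j0 := a.length - 2 - k with hj0def
    have hcast : ((k+1:Nat) : Int) = (k:Int)+1 := by omega
    have hfold : drFold a (((k+1:Nat):Int)+1) = stepR a (a.length:Int) (drFold a ((k:Int)+1)) ((k:Int)+1) := by
      unfold drFold
      rw [hcast, PySem.List.pyRange_one_succ_right (by omega : (1:Int) ≤ (k:Int)+1), List.foldl_append]
      rfl
    set dr := drFold a ((k:Int)+1) with hdr
    have e1 : (a.length:Int) - ((k:Int)+1) = ((j0+1 : Nat):Int) := by omega
    have e2 : (a.length:Int) - 1 - ((k:Int)+1) = ((j0 : Nat):Int) := by omega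
    have e3 : (a.length:Int) - ((k:Int)+1) - 1 = ((j0 : Nat):Int) := by omega
    have hv1 : pvGetA a (pvGetA dr ((j0+1:Nat):Int)) = smin a (j0+1) :=
      (ihent (j0+1) (by omega)).1 (by omega)
    have hv2 : pvGetA dr ((j0:Nat):Int) = ((j0:Nat):Int) :=
      (ihent j0 (by omega)).2 (by omega)
    have haidx : pvGetA a ((j0:Nat):Int) = a.getD j0 0 := by
      unfold pvGetA; rw [PySem.List.pyGetD_natCast]
    have hstep : stepR a (a.length:Int) dr ((k:Int)+1)
        = if smin a (j0+1) < a.getD j0 0 then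
            PySem.List.pySetD dr ((j0:Nat):Int) (pvGetA dr ((j0+1:Nat):Int))
          else dr := by
      unfold stepR
      rw [e3, e2, e1, hv1, hv2, haidx]
    have hsm : smin a j0 = min (smin a (j0+1)) (a.getD j0 0) := smin_step a j0 (by omega)
    rw [hfold, hstep]
    by_cases hc : smin a (j0+1) < a.getD j0 0
    · rw [if_pos hc]
      have hread : ∀ (j : Nat), pvGetA (PySem.List.pySetD dr ((j0:Nat):Int) (pvGetA dr ((j0+1:Nat):Int))) (j:Int)
          = if j = j0 then pvGetA dr ((j0+1:Nat):Int) else pvGetA dr (j:Int) := by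
        intro j
        unfold pvGetA
        exact PySem.List.pyGetD_pySetD_natCast dr j0 j _ 0 (by rw [ihlen]; omega)
      refine ⟨by rw [PySem.List.length_pySetD]; exact ihlen, fun j hj => ⟨fun hjk => ?_, fun hjk => ?_⟩⟩
      · by_cases hje : j = j0
        · subst hje
          rw [hread j0, if_pos rfl, hv1, hsm]
          omega
        · rw [hread j, if_neg hje]
          exact (ihent j hj).1 (by omega)
      · rw [hread j, if_neg (by omega)]
        exact (ihent j hj).2 (by omega)
    · rw [if_neg hc]
      refine ⟨ihlen, fun j hj => ⟨fun hjk => ?_, fun hjk => (ihent j hj).2 (by omega)⟩⟩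
      by_cases hje : j = j0
      · subst hje
        rw [hv2, haidx, hsm]
        omega
      · exact (ihent j hj).1 (by omega)

theorem foldl_sub_count (p : Int → Prop) [DecidablePred p] :
    ∀ (l : List Int) (init : Int),
      l.foldl (fun ans i => if p i then ans - 1 else ans) init
        = init - (l.countP (fun i => decide (p i)) : Int) := by
  intro l
  induction l with
  | nil => simp
  | cons x t ih =>
    intro init
    by_cases hx : p x <;> simp [hx, ih] <;> omega

theorem solution_eq (a : List Int) (h : a ≠ []) :
    solution a = (a.length : Int) - (((List.range a.length).countP (badAt a) : Nat) : Int) := by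
  have hn : 0 < a.length := by cases a with | nil => simp at h | cons x t => simp
  obtain ⟨hlen1, hent1⟩ := dl_inv a (a.length - 1) (by omega)
  obtain ⟨hlen2, hent2⟩ := dr_inv a (a.length - 1) (by omega)
  have hcast : (((a.length - 1 : Nat) : Int)) + 1 = (a.length : Int) := by omega
  have hdl : (PySem.List.pyRange 1 (a.length:Int) 1).foldl (stepL a) (PySem.List.pyRange 0 (a.length:Int) 1)
      = dlFold a (((a.length - 1 : Nat):Int)+1) := by unfold dlFold; rw [hcast]
  have hdr : (PySem.List.pyRange 1 (a.length:Int) 1).foldl (stepR a (a.length:Int)) (PySem.List.pyRange 0 (a.length:Int) 1)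
      = drFold a (((a.length - 1 : Nat):Int)+1) := by unfold drFold; rw [hcast]
  simp only [solution]
  rw [foldl_pair]
  simp only [hdl, hdr]
  rw [foldl_sub_count]
  congr 1
  rw [PySem.List.pyRange_zero_nat, List.countP_map]
  congr 1
  apply List.countP_congr
  intro j hj
  have hjl : j < a.length := List.mem_range.mp hj
  have g1 : pvGetA a ((j:Nat):Int) = a.getD j 0 := by unfold pvGetA; rw [PySem.List.pyGetD_natCast]
  have g2 : pvGetA a (pvGetA (dlFold a (((a.length - 1 : Nat):Int)+1)) ((j:Nat):Int)) = pmin a j :=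
    (hent1 j hjl).1 (by omega)
  have g3 : pvGetA a (pvGetA (drFold a (((a.length - 1 : Nat):Int)+1)) ((j:Nat):Int)) = smin a j :=
    (hent2 j hjl).1 (by omega)
  simp only [Function.comp_apply]
  rw [g2, g3, g1]
  by_cases h1 : pmin a j < a.getD j 0 <;> by_cases h2 : smin a j < a.getD j 0 <;>
    simp [badAt, GT.gt]

-- pmin characterised as "some prefix element is smaller"
theorem pmin_lt_iff (a : List Int) (x : Int) : ∀ i : Nat,
    (pmin a i < x ↔ ∃ j : Nat, j ≤ i ∧ a.getD j 0 < x) := by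
  intro i
  induction i with
  | zero =>
    constructor
    · intro h; exact ⟨0, le_refl 0, h⟩
    · rintro ⟨j, hj, hx⟩
      have : j = 0 := Nat.le_zero.mp hj
      subst this; exact hx
  | succ i ih =>
    show min (pmin a i) (a.getD (i+1) 0) < x ↔ _
    rw [min_lt_iff]
    constructor
    · rintro (h | h)
      · obtain ⟨j, hj, hx⟩ := ih.mp h
        exact ⟨j, by omega, hx⟩
      · exact ⟨i+1, le_refl _, h⟩
    · rintro ⟨j, hj, hx⟩
      by_cases hje : j = i+1
      · subst hje; exact Or.inr hx
      · exact Or.inl (ih.mpr ⟨j, by omega, hx⟩)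

theorem getD_rev (a : List Int) (k : Nat) (h : k < a.length) :
    a.reverse.getD k 0 = a.getD (a.length - 1 - k) 0 := by
  rw [PySem.List.getD_eq_getElem_of_lt a.reverse k 0 (by simpa using h),
      PySem.List.getD_eq_getElem_of_lt a _ 0 (by omega),
      List.getElem_reverse]

theorem smin_lt_iff (a : List Int) (x : Int) (i : Nat) (h : i < a.length) :
    (smin a i < x ↔ ∃ j : Nat, i ≤ j ∧ j < a.length ∧ a.getD j 0 < x) := by
  unfold smin
  rw [pmin_lt_iff]
  constructor
  · rintro ⟨k, hk, hx⟩
    rw [getD_rev a k (by omega)] at hx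
    exact ⟨a.length - 1 - k, by omega, by omega, hx⟩
  · rintro ⟨j, hij, hjn, hx⟩
    refine ⟨a.length - 1 - j, by omega, ?_⟩
    rw [getD_rev a (a.length - 1 - j) (by omega), show a.length - 1 - (a.length - 1 - j) = j from by omega]
    exact hx

theorem foldl_add_count (p : Int → Bool) :
    ∀ (l : List Int) (init : Int),
      l.foldl (fun c i => if p i then c + 1 else c) init = init + (l.countP p : Int) := by
  intro l
  induction l with
  | nil => simp
  | cons x t ih =>
    intro init
    by_cases hx : p x = true <;> simp [hx, ih] <;> omega

-- B's left check equals "not (prefix min is smaller)"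
theorem leftAll_eq (a : List Int) (j : Nat) (hj : j < a.length) :
    ((PySem.List.pyRange 0 ((j:Nat):Int) 1).all
        (fun k => decide (pvGetB a k ≥ pvGetB a ((j:Nat):Int))))
      = !decide (pmin a j < a.getD j 0) := by
  rw [PySem.List.pyRange_zero_nat, List.all_map]
  by_cases h : pmin a j < a.getD j 0
  · obtain ⟨k, hk, hx⟩ := (pmin_lt_iff a (a.getD j 0) j).mp h
    have hkj : k < j := by
      rcases Nat.lt_or_ge k j with hlt | hge
      · exact hlt
      · exfalso; have : k = j := by omega
        subst this; omega
    rw [decide_eq_true h]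
    simp only [Bool.not_true]
    rw [List.all_eq_false]
    refine ⟨k, List.mem_range.mpr hkj, ?_⟩
    simp only [Function.comp_apply, pvGetB, PySem.List.pyGetD_natCast,
      ge_iff_le, decide_eq_true_eq]
    omega
  · rw [decide_eq_false h]
    simp only [Bool.not_false]
    rw [List.all_eq_true]
    intro k hk
    have hkj : k < j := List.mem_range.mp hk
    simp only [Function.comp_apply, pvGetB, PySem.List.pyGetD_natCast]
    have hnot : ¬ a.getD k 0 < a.getD j 0 := by
      intro hlt
      exact h ((pmin_lt_iff a (a.getD j 0) j).mpr ⟨k, by omega, hlt⟩)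
    simp only [ge_iff_le, decide_eq_true_eq]
    omega

-- B's right check equals "not (suffix min is smaller)"
theorem rightAll_eq (a : List Int) (j : Nat) (hj : j < a.length) :
    ((PySem.List.pyRange (((j:Nat):Int)+1) ((a.length:Nat):Int) 1).all
        (fun k => decide (pvGetB a k ≥ pvGetB a ((j:Nat):Int))))
      = !decide (smin a j < a.getD j 0) := by
  rw [PySem.List.pyRange_one, List.all_map]
  by_cases h : smin a j < a.getD j 0
  · obtain ⟨m, hjm, hmn, hx⟩ := (smin_lt_iff a (a.getD j 0) j hj).mp h
    have hmj : j < m := by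
      rcases Nat.lt_or_ge j m with hlt | hge
      · exact hlt
      · exfalso; have : m = j := by omega
        subst this; omega
    rw [decide_eq_true h]
    simp only [Bool.not_true]
    rw [List.all_eq_false]
    refine ⟨m - j - 1, List.mem_range.mpr (by omega), ?_⟩
    have hidx : ((j:Nat):Int) + 1 + ((m - j - 1 : Nat) : Int) = ((m:Nat):Int) := by omega
    simp only [Function.comp_apply, hidx, pvGetB, PySem.List.pyGetD_natCast,
      ge_iff_le, decide_eq_true_eq]
    omega
  · rw [decide_eq_false h]
    simp only [Bool.not_false]
    rw [List.all_eq_true]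
    intro k hk
    have hkb : k < ((a.length:Int) - ((j:Int)+1)).toNat := List.mem_range.mp hk
    have hidx : ((j:Nat):Int) + 1 + ((k:Nat):Int) = ((j + 1 + k : Nat):Int) := by omega
    simp only [Function.comp_apply, hidx, pvGetB, PySem.List.pyGetD_natCast]
    have hnot : ¬ a.getD (j+1+k) 0 < a.getD j 0 := by
      intro hlt
      exact h ((smin_lt_iff a (a.getD j 0) j hj).mpr ⟨j+1+k, by omega, by omega, hlt⟩)
    simp only [ge_iff_le, decide_eq_true_eq]
    omega

theorem alt_eq (a : List Int) :
    solution_alt a = (((List.range a.length).countP (fun j => !badAt a j) : Nat) : Int) := by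
  simp only [solution_alt]
  rw [foldl_add_count]
  rw [PySem.List.pyRange_zero_nat, List.countP_map]
  simp only [Int.zero_add]
  congr 1
  apply List.countP_congr
  intro j hj
  have hjl : j < a.length := List.mem_range.mp hj
  simp only [Function.comp_apply]
  rw [leftAll_eq a j hjl, rightAll_eq a j hjl]
  unfold badAt
  by_cases h1 : pmin a j < a.getD j 0 <;> by_cases h2 : smin a j < a.getD j 0 <;>
    simp

-- ===== VERDICT (by name: the statement is the Claim_ definition above) =====
theorem solution_spec : Claim_equal_solution := by
  intro a _
  unfold Spec_solution
  by_cases h : a = []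
  · subst h; rfl
  · rw [solution_eq a h, alt_eq a]
    have hsplit := List.length_eq_countP_add_countP (badAt a) (l := List.range a.length)
    have hc : (List.range a.length).countP (fun j => !badAt a j)
        = (List.range a.length).countP (fun x => decide ¬ badAt a x = true) := by
      apply List.countP_congr
      intro x _
      cases badAt a x <;> simp
    simp only [List.length_range] at hsplit
    rw [hc]
    omega
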